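-- pv_equiv track=rewrite | github.com/tiiuae/sbomnix | src/common/flakeref.py | quote_nix_attr_segment
-- ===== SOURCE A (Python) =====
-- def quote_nix_attr_segment(name: str) -> str:
--     """Return a safely quoted Nix attr path segment."""
--     escaped = []
--     idx = 0
--     while idx < len(name):
--         if name.startswith("${", idx):
--             escaped.append(r"\${")
--             idx += 2
--             continue
--         char = name[idx]
--         if char == '"':
--             escaped.append('\\"')
--         elif char == "\\":
--             escaped.append("\\\\")
--         elif char == "\n":
--             escaped.append("\\n")
--         elif char == "\r":
--             escaped.append("\\r")
--         elif char == "\t":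
--             escaped.append("\\t")
--         else:
--             escaped.append(char)
--         idx += 1
--     return '"' + "".join(escaped) + '"'
-- ===== SOURCE B (Python) =====
-- _TABLE = str.maketrans({'"': '\\"', '\\': '\\\\', '\n': '\\n', '\r': '\\r', '\t': '\\t'})
--
-- def quote_nix_attr_segment(name: str) -> str:
--     """Return a safely quoted Nix attr path segment."""
--     pieces = [piece.translate(_TABLE) for piece in name.split("${")]
--     return '"' + "\\${".join(pieces) + '"'
-- ===== Notes on version B (the rewrite author's own statement) =====
-- stated objective: simpler
-- what changed: Replaced A's index-scanning while loop with startswith lookahead by split on the two-character delimiter, a per-character str.translate escape of each piece, and a join with the escaped delimiter.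
import Mathlib
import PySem

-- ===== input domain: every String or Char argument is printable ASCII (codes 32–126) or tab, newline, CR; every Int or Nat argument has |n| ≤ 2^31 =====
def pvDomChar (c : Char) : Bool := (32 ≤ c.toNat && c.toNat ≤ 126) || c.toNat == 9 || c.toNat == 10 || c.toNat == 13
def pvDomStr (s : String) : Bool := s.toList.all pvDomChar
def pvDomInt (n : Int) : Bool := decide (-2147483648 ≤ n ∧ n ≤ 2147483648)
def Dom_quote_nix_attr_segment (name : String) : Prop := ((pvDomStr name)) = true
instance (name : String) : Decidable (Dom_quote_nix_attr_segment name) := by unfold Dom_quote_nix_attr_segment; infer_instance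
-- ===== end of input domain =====

-- B replaces A's index scan with split-on-"${" / per-char translate / join-with-"\${" (objective: simpler; a timing run measured B faster, via C-level split/translate).

-- ===== PORT A =====
-- A's per-character if/elif escape chain
def qnasStepA (c : Char) : String :=
  if c = '"' then "\\\""
  else if c = '\\' then "\\\\"
  else if c = '\n' then "\\n"
  else if c = '\r' then "\\r"
  else if c = '\t' then "\\t"
  else String.ofList [c]

-- A's while loop: lookahead for "${" (consume 2) else one escaped char
def qnasEscA : List Char → List String
  | '$' :: '{' :: rest => "\\${" :: qnasEscA rest
  | c :: rest => qnasStepA c :: qnasEscA rest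
  | [] => []

def quote_nix_attr_segment (name : String) : String :=
  "\"" ++ String.join (qnasEscA name.toList) ++ "\""

-- ===== PORT B =====
-- the str.maketrans table as a function
def qnasTr : Char → String
  | '"' => "\\\""
  | '\\' => "\\\\"
  | '\n' => "\\n"
  | '\r' => "\\r"
  | '\t' => "\\t"
  | c => String.ofList [c]

-- name.split("${") (non-overlapping, left to right)
def qnasSplit : List Char → List (List Char)
  | '$' :: '{' :: rest => [] :: qnasSplit rest
  | c :: rest =>
    match qnasSplit rest with
    | p :: ps => (c :: p) :: ps
    | [] => [[c]]
  | [] => [[]]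

-- piece.translate(_TABLE)
def qnasPiece : List Char → String
  | [] => ""
  | c :: p => qnasTr c ++ qnasPiece p

-- sep.join(pieces)
def qnasJoin (sep : String) : List String → String
  | [] => ""
  | [s] => s
  | s :: rest => s ++ sep ++ qnasJoin sep rest

def quote_nix_attr_segment_alt (name : String) : String :=
  "\"" ++ qnasJoin "\\${" ((qnasSplit name.toList).map qnasPiece) ++ "\""

-- ===== PRECONDITION & SPEC =====
def Spec_quote_nix_attr_segment (name : String) (out : String) : Prop := out = quote_nix_attr_segment_alt name
instance (name : String) (out : String) : Decidable (Spec_quote_nix_attr_segment name out) := by unfold Spec_quote_nix_attr_segment; infer_instance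

-- ===== CLAIM (what is proved, stated in full; the proofs are below) =====
def Claim_equal_quote_nix_attr_segment : Prop := ∀ (name : String), Dom_quote_nix_attr_segment name → Spec_quote_nix_attr_segment name (quote_nix_attr_segment name)

-- ===== LEMMAS AND PROOFS =====

theorem qnasTr_eq_stepA (c : Char) : qnasTr c = qnasStepA c := by
  unfold qnasTr qnasStepA
  split <;> simp_all

theorem qnasSplit_ne_nil (l : List Char) : qnasSplit l ≠ [] := by
  fun_induction qnasSplit l <;> simp_all

theorem join_cons (s : String) (l : List String) :
    String.join (s :: l) = s ++ String.join l := by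
  simp [String.join_eq]

theorem qnasJoin_cons_prepend (sep s : String) (p : String) (ps : List String) :
    qnasJoin sep ((s ++ p) :: ps) = s ++ qnasJoin sep (p :: ps) := by
  cases ps <;> simp [qnasJoin, String.append_assoc]

theorem qnas_main (l : List Char) :
    qnasJoin "\\${" ((qnasSplit l).map qnasPiece) = String.join (qnasEscA l) := by
  fun_induction qnasSplit l with
  | case1 rest ih =>
    rw [qnasEscA, join_cons, ← ih]
    rcases h : qnasSplit rest with _ | ⟨p, ps⟩
    · exact absurd h (qnasSplit_ne_nil rest)
    · simp [qnasJoin, qnasPiece]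
  | case2 c rest h1 p ps hsplit ih =>
    rw [qnasEscA.eq_def]
    split
    · exfalso; simp_all
    · rename_i c' rest' heq
      injection heq with hc hr; subst hc; subst hr
      rw [join_cons, ← ih, hsplit]
      show qnasJoin _ (qnasPiece (c :: p) :: _) = _
      rw [show qnasPiece (c :: p) = qnasTr c ++ qnasPiece p from rfl,
          List.map_cons, qnasJoin_cons_prepend, qnasTr_eq_stepA]
    · rename_i heq; exact absurd heq (by simp)
  | case3 c rest h1 hsplit ih =>
    exact absurd hsplit (qnasSplit_ne_nil rest)
  | case4 => simp [qnasEscA, qnasJoin, qnasPiece, String.join_eq]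

-- ===== VERDICT (by name: the statement is the Claim_ definition above) =====
theorem quote_nix_attr_segment_spec : Claim_equal_quote_nix_attr_segment := by
  intro name _
  unfold Spec_quote_nix_attr_segment quote_nix_attr_segment quote_nix_attr_segment_alt
  rw [qnas_main]
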